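-- pv_equiv track=rewrite | github.com/zazabap/problem-reductions | docs/paper/verify-reductions/adversary_k_satisfiability_feasible_register_assignment.py | check_fra
-- ===== SOURCE A (Python) =====
-- def check_fra(nv: int, edges: list[tuple[int, int]], regs: list[int],
--               perm: list[int]) -> bool:
--     """
--     Check FRA feasibility. perm[step] = vertex computed at that step.
--     Independent reimplementation.
--     """
--     if len(perm) != nv or set(perm) != set(range(nv)):
--         return False
--
--     # Build adjacency
--     preds: list[set[int]] = [set() for _ in range(nv)]
--     succs: list[set[int]] = [set() for _ in range(nv)]
--     for v, u in edges:
--         preds[v].add(u)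
--         succs[u].add(v)
--
--     done: set[int] = set()
--     for step in range(nv):
--         v = perm[step]
--         # Topological check
--         if not preds[v] <= done:
--             return False
--         # Register conflict check
--         r = regs[v]
--         for w in perm[:step]:
--             if regs[w] == r:
--                 # w is still live if it has undone successors besides v
--                 if any(s != v and s not in done for s in succs[w]):
--                     return False
--         done.add(v)
--     return True
-- ===== SOURCE B (Python) =====
-- def check_fra(nv: int, edges: list[tuple[int, int]], regs: list[int],
--               perm: list[int]) -> bool:
--     """
--     FRA feasibility via step positions: pos[v] = step of v, nxt[v] = first
--     later step reusing regs[v].  One linear pass instead of the per-step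
--     scan of all earlier vertices.
--     """
--     if len(perm) != nv or set(perm) != set(range(nv)):
--         return False
--     pos = [0] * nv
--     for step, v in enumerate(perm):
--         pos[v] = step
--     inf = nv + 1
--     nxt = [inf] * nv
--     last: dict[int, int] = {}
--     for v in reversed(perm):
--         r = regs[v]
--         if r in last:
--             nxt[v] = last[r]
--         last[r] = pos[v]
--     for v, u in edges:
--         # u -> v: u must be computed before v, and regs[u] must not be
--         # reused strictly between step pos[u] and step pos[v].
--         if pos[u] >= pos[v] or nxt[u] < pos[v]:
--             return False
--     return True
-- ===== Notes on version B (the rewrite author's own statement) =====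
-- stated objective: alternative
-- what changed: A re-scans all earlier vertices and their successor sets at every step (per-step liveness probing); B computes each vertex's schedule position and, in one reversed pass with a last-seen-position dict, the next step that reuses each vertex's register, then validates every edge with two comparisons (O(nv+E) passes instead of nested per-step scans; not measurably faster on the generated inputs).
-- outside the precondition, e.g. on check_fra(2, [(-1, 0)], [0, 0], [0, 1]): A returns False, B returns True; on check_fra(2, [(0, 1)], [], [0, 1]): A returns False, B raises IndexError; on check_fra(2, [(5, 0)], [0, 0], [0, 1]): A raises IndexError, B raises IndexError
import Mathlib
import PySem

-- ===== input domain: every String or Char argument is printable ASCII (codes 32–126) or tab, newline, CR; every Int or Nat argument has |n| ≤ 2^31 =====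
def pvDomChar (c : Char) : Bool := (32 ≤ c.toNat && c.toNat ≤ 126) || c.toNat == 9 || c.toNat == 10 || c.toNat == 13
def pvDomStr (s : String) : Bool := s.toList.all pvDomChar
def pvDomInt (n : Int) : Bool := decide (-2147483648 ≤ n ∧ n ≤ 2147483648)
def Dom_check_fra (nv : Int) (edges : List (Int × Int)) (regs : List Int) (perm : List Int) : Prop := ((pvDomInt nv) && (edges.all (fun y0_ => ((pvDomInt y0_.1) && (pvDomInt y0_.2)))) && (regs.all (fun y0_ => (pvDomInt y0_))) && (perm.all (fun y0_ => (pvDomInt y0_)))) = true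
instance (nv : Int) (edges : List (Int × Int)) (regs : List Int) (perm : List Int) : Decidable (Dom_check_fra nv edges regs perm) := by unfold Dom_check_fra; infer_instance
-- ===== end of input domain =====

-- B replaces A's per-step scan of all earlier vertices by one pass computing, for each
-- vertex, the next step that reuses its register; equivalence of the return values is
-- proved on Pre_ (both programs are read-only on their arguments).

-- ===== PORT A =====
-- shared guard: Python's `len(perm) != nv or set(perm) != set(range(nv))` (first line of both programs)
def fraGuard (nv : Int) (perm : List Int) : Bool :=
  decide ((perm.length : Int) = nv) &&
    PySem.Set.equal (PySem.Set.ofList perm) (PySem.Set.ofList (PySem.List.pyRange 0 nv 1))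

-- `preds[v].add(u); succs[u].add(v)` for one edge
def fraAdjStep (ps : List (PySem.Set Int) × List (PySem.Set Int)) (e : Int × Int) :
    List (PySem.Set Int) × List (PySem.Set Int) :=
  (PySem.List.pySetD ps.1 e.1 (PySem.Set.add (PySem.List.pyGetD ps.1 e.1 []) e.2),
   PySem.List.pySetD ps.2 e.2 (PySem.Set.add (PySem.List.pyGetD ps.2 e.2 []) e.1))

def fraAdj (nv : Int) (edges : List (Int × Int)) :
    List (PySem.Set Int) × List (PySem.Set Int) :=
  edges.foldl fraAdjStep (List.replicate nv.toNat [], List.replicate nv.toNat [])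

-- A's main loop; `pre` is perm[:step], `done` the set built by done.add(v)
def fraLoopA (preds succs : List (PySem.Set Int)) (regs : List Int)
    (pre rest : List Int) (done : PySem.Set Int) : Bool :=
  match rest with
  | [] => true
  | v :: rest' =>
    if !(PySem.Set.issubset (PySem.List.pyGetD preds v []) done) then false
    else
      let r := PySem.List.pyGetD regs v 0
      if pre.any (fun w => PySem.List.pyGetD regs w 0 == r &&
          (PySem.List.pyGetD succs w []).any (fun s => s != v && !(PySem.Set.contains done s))) then
        false
      else fraLoopA preds succs regs (pre ++ [v]) rest' (PySem.Set.add done v)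

def check_fra (nv : Int) (edges : List (Int × Int)) (regs : List Int) (perm : List Int) : Bool :=
  if !(fraGuard nv perm) then false
  else
    let adj := fraAdj nv edges
    fraLoopA adj.1 adj.2 regs [] perm []

-- ===== PORT B =====
-- `pos[v] = step for step, v in enumerate(perm)`
def fraPos (nv : Int) (perm : List Int) : List Int :=
  (PySem.List.enumerate perm).foldl (fun a p => PySem.List.pySetD a p.2 p.1)
    (List.replicate nv.toNat 0)

-- one step of the reversed pass: `r = regs[v]; if r in last: nxt[v] = last[r]; last[r] = pos[v]`
def fraNxtStep (regs pos : List Int) (st : List Int × PySem.Dict Int Int) (v : Int) :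
    List Int × PySem.Dict Int Int :=
  let r := PySem.List.pyGetD regs v 0
  let nxt' := match st.2.get? r with
    | some p => PySem.List.pySetD st.1 v p
    | none => st.1
  (nxt', st.2.insert r (PySem.List.pyGetD pos v 0))

def check_fra_alt (nv : Int) (edges : List (Int × Int)) (regs : List Int) (perm : List Int) : Bool :=
  if !(fraGuard nv perm) then false
  else
    let pos := fraPos nv perm
    let st := perm.reverse.foldl (fraNxtStep regs pos)
      (List.replicate nv.toNat (nv + 1), PySem.Dict.empty)
    edges.all (fun e =>
      !(decide (PySem.List.pyGetD pos e.2 0 ≥ PySem.List.pyGetD pos e.1 0)) &&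
      !(decide (PySem.List.pyGetD st.1 e.2 0 < PySem.List.pyGetD pos e.1 0)))

-- ===== PRECONDITION & SPEC =====
-- When perm is a valid schedule (a permutation of range(nv), so the main work runs), Pre_
-- excludes edge endpoints outside [0, nv) and regs shorter than nv: on such inputs A raises
-- IndexError, or returns a value produced by Python's negative-index wraparound or by
-- returning before the out-of-range regs access, which B does not reproduce.
def Pre_check_fra (nv : Int) (edges : List (Int × Int)) (regs : List Int) (perm : List Int) : Prop :=
  ((perm.length : Int) = nv ∧ ∀ i ∈ PySem.List.pyRange 0 nv 1, i ∈ perm) →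
    ((∀ e ∈ edges, (0 ≤ e.1 ∧ e.1 < nv) ∧ (0 ≤ e.2 ∧ e.2 < nv)) ∧ nv ≤ (regs.length : Int))
instance (nv : Int) (edges : List (Int × Int)) (regs : List Int) (perm : List Int) : Decidable (Pre_check_fra nv edges regs perm) := by unfold Pre_check_fra; infer_instance

def pvWitness_check_fra : Int × (List (Int × Int)) × List Int × List Int :=
  (2, [(1, 0)], [0, 1], [0, 1])

def Spec_check_fra (nv : Int) (edges : List (Int × Int)) (regs : List Int) (perm : List Int) (out : Bool) : Prop := out = check_fra_alt nv edges regs perm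
instance (nv : Int) (edges : List (Int × Int)) (regs : List Int) (perm : List Int) (out : Bool) : Decidable (Spec_check_fra nv edges regs perm out) := by unfold Spec_check_fra; infer_instance

-- ===== CLAIM (what is proved, stated in full; the proofs are below) =====
def Claim_equal_check_fra : Prop := ∀ (nv : Int) (edges : List (Int × Int)) (regs : List Int) (perm : List Int), Dom_check_fra nv edges regs perm → Pre_check_fra nv edges regs perm → Spec_check_fra nv edges regs perm (check_fra nv edges regs perm)

-- ===== LEMMAS AND PROOFS =====

-- the common characterisation both programs are proved equal to (for a valid perm):
-- every edge (v, u) has u scheduled first, and no vertex x reuses u's register strictly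
-- between u's step and v's step
def fraOk (edges : List (Int × Int)) (regs perm : List Int) : Prop :=
  ∀ e ∈ edges, (perm.idxOf e.2 < perm.idxOf e.1 ∧
    ∀ x ∈ perm, PySem.List.pyGetD regs x 0 = PySem.List.pyGetD regs e.2 0 →
      perm.idxOf e.2 < perm.idxOf x → perm.idxOf e.1 ≤ perm.idxOf x)

lemma fra_guard_facts (nv : Int) (perm : List Int) (h : fraGuard nv perm = true) :
    (perm.length : Int) = nv ∧ perm.Nodup ∧ ∀ x : Int, x ∈ perm ↔ 0 ≤ x ∧ x < nv := by
  unfold fraGuard at h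
  simp only [Bool.and_eq_true, decide_eq_true_eq] at h
  obtain ⟨hlen, hset⟩ := h
  rw [PySem.Set.equal_iff] at hset
  have hmem : ∀ x : Int, x ∈ perm ↔ 0 ≤ x ∧ x < nv := by
    intro x
    have := hset x
    simpa [PySem.Set.mem_ofList, PySem.List.mem_pyRange_one] using this
  refine ⟨hlen, ?_, hmem⟩
  have h1 : perm.dedup.Nodup := List.nodup_dedup perm
  have h2 : (PySem.List.pyRange 0 nv 1).Nodup := PySem.List.nodup_pyRange_one 0 nv
  have hp : perm.dedup.Perm (PySem.List.pyRange 0 nv 1) :=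
    (List.perm_ext_iff_of_nodup h1 h2).2 (by
      intro a; simp only [List.mem_dedup, PySem.List.mem_pyRange_one, hmem a])
  have hlen2 : perm.dedup.length = perm.length := by
    have := hp.length_eq
    rw [PySem.List.length_pyRange_one] at this
    omega
  have := List.Sublist.eq_of_length (List.dedup_sublist perm) hlen2
  exact List.dedup_eq_self.mp this
lemma fra_adj_len (nv : Int) (edges : List (Int × Int)) :
    (fraAdj nv edges).1.length = nv.toNat ∧ (fraAdj nv edges).2.length = nv.toNat := by
  induction edges using List.reverseRecOn with
  | nil => simp [fraAdj]
  | append_singleton es e ih =>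
    unfold fraAdj at *
    rw [List.foldl_append] at *
    simp only [List.foldl_cons, List.foldl_nil]
    simp only [fraAdjStep, PySem.List.length_pySetD]
    exact ih
lemma fra_adj_mem (nv : Int) (edges : List (Int × Int))
    (hE : ∀ e ∈ edges, (0 ≤ e.1 ∧ e.1 < nv) ∧ (0 ≤ e.2 ∧ e.2 < nv))
    (v u : Int) (hv0 : 0 ≤ v) (hv1 : v < nv) :
    (u ∈ PySem.List.pyGetD (fraAdj nv edges).1 v [] ↔ (v, u) ∈ edges) ∧
    (u ∈ PySem.List.pyGetD (fraAdj nv edges).2 v [] ↔ (u, v) ∈ edges) := by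
  induction edges using List.reverseRecOn with
  | nil =>
    have hv : v = ((v.toNat : ℕ) : Int) := (Int.toNat_of_nonneg hv0).symm
    constructor <;>
    · rw [fraAdj, List.foldl_nil, hv, PySem.List.pyGetD_natCast]
      simp [List.getD, List.getElem?_replicate]
      split <;> simp
  | append_singleton es e ih =>
    have hEes : ∀ e' ∈ es, (0 ≤ e'.1 ∧ e'.1 < nv) ∧ (0 ≤ e'.2 ∧ e'.2 < nv) := by
      intro e' he'; exact hE e' (by simp [he'])
    have he := hE e (by simp)
    have ihs := ih hEes
    have hlen := fra_adj_len nv es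
    have hunf : fraAdj nv (es ++ [e]) = fraAdjStep (fraAdj nv es) e := by
      unfold fraAdj
      rw [List.foldl_append, List.foldl_cons, List.foldl_nil]
    rw [hunf]
    have hv : v = ((v.toNat : ℕ) : Int) := (Int.toNat_of_nonneg hv0).symm
    have he1 : e.1 = ((e.1.toNat : ℕ) : Int) := (Int.toNat_of_nonneg he.1.1).symm
    have he2 : e.2 = ((e.2.toNat : ℕ) : Int) := (Int.toNat_of_nonneg he.2.1).symm
    constructor
    · show u ∈ PySem.List.pyGetD (PySem.List.pySetD (fraAdj nv es).1 e.1 _) v [] ↔ _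
      rw [hv, he1, PySem.List.pyGetD_pySetD_natCast _ _ _ _ _ (by omega)]
      by_cases hveq : v.toNat = e.1.toNat
      · rw [if_pos hveq]
        have hve : v = e.1 := by omega
        subst hve
        rw [← he1]
        simp only [PySem.Set.mem_add, List.mem_append, List.mem_singleton, ihs.1, Prod.ext_iff]
        tauto
      · rw [if_neg hveq, ← hv, ihs.1]
        have hne : (v, u) ≠ e := fun h => hveq (by rw [← h])
        simp [hne]
    · show u ∈ PySem.List.pyGetD (PySem.List.pySetD (fraAdj nv es).2 e.2 _) v [] ↔ _
      rw [hv, he2, PySem.List.pyGetD_pySetD_natCast _ _ _ _ _ (by omega)]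
      by_cases hveq : v.toNat = e.2.toNat
      · rw [if_pos hveq]
        have hve : v = e.2 := by omega
        subst hve
        rw [← he2]
        simp only [PySem.Set.mem_add, List.mem_append, List.mem_singleton, ihs.2, Prod.ext_iff]
        tauto
      · rw [if_neg hveq, ← hv, ihs.2]
        have hne : (u, v) ≠ e := fun h => hveq (by rw [← h])
        simp [hne]
lemma fra_cons_split_iff {α : Type} (x : α) (xs : List α) (P : List α → α → Prop) :
    (∀ a v b, x :: xs = a ++ v :: b → P a v) ↔
      (P [] x ∧ ∀ a v b, xs = a ++ v :: b → P (x :: a) v) := by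
  constructor
  · intro h
    exact ⟨h [] x xs rfl, fun a v b hb => h (x :: a) v b (by rw [hb]; rfl)⟩
  · rintro ⟨h0, h1⟩ a v b heq
    cases a with
    | nil => simp at heq; rw [← heq.1]; exact h0
    | cons y a' =>
      simp at heq
      obtain ⟨rfl, heq2⟩ := heq
      exact h1 a' v b heq2
lemma fra_any_iff (succs : List (PySem.Set Int)) (regs pre : List Int) (v : Int) :
    (pre.any (fun w => PySem.List.pyGetD regs w 0 == PySem.List.pyGetD regs v 0 &&
        (PySem.List.pyGetD succs w []).any (fun s => s != v && !(PySem.Set.contains pre s))) = true)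
      ↔ ¬ (∀ w ∈ pre, PySem.List.pyGetD regs w 0 = PySem.List.pyGetD regs v 0 →
            ∀ s ∈ PySem.List.pyGetD succs w [], s = v ∨ s ∈ pre) := by
  simp only [List.any_eq_true, Bool.and_eq_true, beq_iff_eq, bne_iff_ne,
    PySem.Set.contains_eq_listContains, List.contains_eq_mem, Bool.not_eq_eq_eq_not,
    Bool.not_true, decide_eq_false_iff_not]
  push_neg
  constructor
  · rintro ⟨w, hw, hreq, s, hs, hsv, hsp⟩
    exact ⟨w, hw, hreq, s, hs, hsv, hsp⟩
  · rintro ⟨w, hw, hreq, s, hs, hsv, hsp⟩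
    exact ⟨w, hw, hreq, s, hs, hsv, hsp⟩

lemma fra_loopA_iff (preds succs : List (PySem.Set Int)) (regs : List Int) :
    ∀ (rest pre : List Int), (pre ++ rest).Nodup →
    (fraLoopA preds succs regs pre rest pre = true ↔
      ∀ a v b, rest = a ++ v :: b →
        ((∀ u ∈ PySem.List.pyGetD preds v [], u ∈ pre ++ a) ∧
         ∀ w ∈ pre ++ a, PySem.List.pyGetD regs w 0 = PySem.List.pyGetD regs v 0 →
           ∀ s ∈ PySem.List.pyGetD succs w [], s = v ∨ s ∈ pre ++ a)) := by
  intro rest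
  induction rest with
  | nil =>
    intro pre hnd
    constructor
    · intro _ a v b h
      exact absurd h (by simp)
    · intro _; rfl
  | cons v rest' ih =>
    intro pre hnd
    have hvpre : v ∉ pre := by
      have := List.disjoint_of_nodup_append hnd
      intro h; exact this h List.mem_cons_self
    have hnd' : ((pre ++ [v]) ++ rest').Nodup := by
      rw [List.append_assoc]
      simpa using hnd
    rw [fraLoopA, PySem.Set.add_of_not_mem hvpre, fra_cons_split_iff]
    by_cases h1 : PySem.Set.issubset (PySem.List.pyGetD preds v []) pre = true
    · rw [h1]
      show (if (!true) = true then false else _) = true ↔ _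
      rw [if_neg (by simp)]
      by_cases h2 : pre.any (fun w => PySem.List.pyGetD regs w 0 == PySem.List.pyGetD regs v 0 &&
          (PySem.List.pyGetD succs w []).any (fun s => s != v && !(PySem.Set.contains pre s))) = true
      · rw [if_pos h2]
        rw [fra_any_iff] at h2
        simp only [Bool.false_eq_true, false_iff, not_and]
        intro hcl _
        exact h2 (by simpa using hcl.2)
      · rw [if_neg h2]
        rw [fra_any_iff] at h2
        push_neg at h2
        rw [ih (pre ++ [v]) hnd']
        have hclause : (∀ u ∈ PySem.List.pyGetD preds v [], u ∈ pre ++ ([] : List Int)) ∧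
            (∀ w ∈ pre ++ ([] : List Int), PySem.List.pyGetD regs w 0 = PySem.List.pyGetD regs v 0 →
              ∀ s ∈ PySem.List.pyGetD succs w [], s = v ∨ s ∈ pre ++ ([] : List Int)) := by
          simp only [List.append_nil]
          exact ⟨(PySem.Set.issubset_iff _ _).mp h1, h2⟩
        constructor
        · intro hrec
          refine ⟨hclause, fun a v' b hab => ?_⟩
          have := hrec a v' b hab
          simpa [List.append_assoc] using this
        · rintro ⟨_, hrest⟩ a v' b hab
          have := hrest a v' b hab
          simpa [List.append_assoc] using this
    · rw [Bool.not_eq_true] at h1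
      rw [h1]
      show (if (!false) = true then false else _) = true ↔ _
      rw [if_pos (by simp)]
      simp only [Bool.false_eq_true, false_iff, not_and]
      intro hcl
      have hsub : PySem.Set.issubset (PySem.List.pyGetD preds v []) pre = true :=
        (PySem.Set.issubset_iff _ _).mpr (by simpa using hcl.1)
      rw [hsub] at h1
      exact absurd h1 (by simp)
lemma fra_mem_prefix_iff (a b : List Int) (v x : Int) (h : (a ++ v :: b).Nodup)
    (hx : x ∈ a ++ v :: b) : x ∈ a ↔ (a ++ v :: b).idxOf x < a.length := by
  constructor
  · intro hxa
    rw [List.idxOf_append_of_mem hxa]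
    exact List.idxOf_lt_length_iff.mpr hxa
  · intro hidx
    by_contra hxa
    rw [List.idxOf_append, if_neg hxa] at hidx
    omega
lemma fra_idxOf_mid (a b : List Int) (v : Int) (h : (a ++ v :: b).Nodup) :
    (a ++ v :: b).idxOf v = a.length := by
  have hva : v ∉ a := by
    intro hv
    exact (List.disjoint_of_nodup_append h) hv (List.mem_cons_self)
  rw [List.idxOf_append, if_neg hva, List.idxOf_cons_self]
  omega
lemma fra_idx_inj (perm : List Int) (h : perm.Nodup) (x y : Int) (hx : x ∈ perm)
    (hy : y ∈ perm) (hxy : perm.idxOf x = perm.idxOf y) : x = y := by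
  have h1 := List.getElem_idxOf (List.idxOf_lt_length_iff.mpr hx)
  have h2 := List.getElem_idxOf (List.idxOf_lt_length_iff.mpr hy)
  rw [← h1, ← h2]
  congr 1
lemma fra_mem_drop_iff (perm : List Int) (hnd : perm.Nodup) (k : ℕ) (x : Int) :
    x ∈ perm.drop k ↔ x ∈ perm ∧ k ≤ perm.idxOf x := by
  constructor
  · intro hx
    obtain ⟨j, hj, hget⟩ := List.getElem_of_mem hx
    rw [List.getElem_drop] at hget
    subst hget
    refine ⟨List.getElem_mem _, ?_⟩
    rw [hnd.idxOf_getElem]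
    omega
  · rintro ⟨hx, hk⟩
    have hi := List.idxOf_lt_length_iff.mpr hx
    have h3 : perm.idxOf x - k < (perm.drop k).length := by simp; omega
    have h4 : (perm.drop k)[perm.idxOf x - k]'h3 = perm[k + (perm.idxOf x - k)] :=
      List.getElem_drop
    have h5 : perm[k + (perm.idxOf x - k)]'(by omega) = x := by
      have : k + (perm.idxOf x - k) = perm.idxOf x := by omega
      simp only [this]
      exact List.getElem_idxOf hi
    rw [← h5, ← h4]
    exact List.getElem_mem _
lemma fra_A_eq (nv : Int) (edges : List (Int × Int)) (regs perm : List Int)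
    (hg : fraGuard nv perm = true)
    (hE : ∀ e ∈ edges, (0 ≤ e.1 ∧ e.1 < nv) ∧ (0 ≤ e.2 ∧ e.2 < nv)) :
    (check_fra nv edges regs perm = true ↔ fraOk edges regs perm) := by
  obtain ⟨hlen, hnd, hmem⟩ := fra_guard_facts nv perm hg
  unfold check_fra
  rw [hg]
  rw [if_neg (by simp)]
  rw [fra_loopA_iff (fraAdj nv edges).1 (fraAdj nv edges).2 regs perm [] (by simpa using hnd)]
  constructor
  · intro H e he
    obtain ⟨⟨he10, he11⟩, he20, he21⟩ := hE e he
    have hv : e.1 ∈ perm := (hmem e.1).mpr ⟨he10, he11⟩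
    have hu : e.2 ∈ perm := (hmem e.2).mpr ⟨he20, he21⟩
    obtain ⟨p, q, hpq⟩ := List.append_of_mem hv
    have hndp : (p ++ e.1 :: q).Nodup := hpq ▸ hnd
    have hcl := H p e.1 q hpq
    simp only [List.nil_append] at hcl
    have hadj1 := (fra_adj_mem nv edges hE e.1 e.2 he10 he11).1
    have hup : e.2 ∈ p := hcl.1 e.2 (hadj1.mpr (by simpa using he))
    have hid1 : (p ++ e.1 :: q).idxOf e.1 = p.length := fra_idxOf_mid p q e.1 hndp
    have hid2 : (p ++ e.1 :: q).idxOf e.2 < p.length :=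
      (fra_mem_prefix_iff p q e.1 e.2 hndp (hpq ▸ hu)).mp hup
    constructor
    · rw [hpq, hid1]
      exact hid2
    · intro x hx hreg hlt
      by_contra hxv
      push_neg at hxv
      obtain ⟨c, d, hcd⟩ := List.append_of_mem hx
      have hndc : (c ++ x :: d).Nodup := hcd ▸ hnd
      have hclx := H c x d hcd
      simp only [List.nil_append] at hclx
      have hidx : (c ++ x :: d).idxOf x = c.length := fra_idxOf_mid c d x hndc
      rw [hcd] at hlt hxv
      rw [hidx] at hlt hxv
      have hwc : e.2 ∈ c := (fra_mem_prefix_iff c d x e.2 hndc (hcd ▸ hu)).mpr hlt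
      have hsucc := (fra_adj_mem nv edges hE e.2 e.1 he20 he21).2
      have hstep := hclx.2 e.2 hwc hreg.symm e.1 (hsucc.mpr (by simpa using he))
      rcases hstep with h | h
      · rw [h, hidx] at hxv
        exact absurd hxv (lt_irrefl _)
      · have := (fra_mem_prefix_iff c d x e.1 hndc (hcd ▸ hv)).mp h
        omega
  · intro H a v b hab
    have hndx : (a ++ v :: b).Nodup := hab ▸ hnd
    have hv : v ∈ perm := by rw [hab]; simp
    obtain ⟨hv0, hv1⟩ := (hmem v).mp hv
    have hidv : (a ++ v :: b).idxOf v = a.length := fra_idxOf_mid a b v hndx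
    constructor
    · simp only [List.nil_append]
      intro u hu'
      have hedge : (v, u) ∈ edges := ((fra_adj_mem nv edges hE v u hv0 hv1).1).mp hu'
      obtain ⟨-, hu0, hu1⟩ := hE (v, u) hedge
      have hu : u ∈ perm := (hmem u).mpr ⟨hu0, hu1⟩
      have h := (H (v, u) hedge).1
      rw [hab] at h
      rw [hidv] at h
      exact (fra_mem_prefix_iff a b v u hndx (hab ▸ hu)).mpr h
    · intro w hw hreg s hs
      simp only [List.nil_append] at hw ⊢
      have hwperm : w ∈ perm := by rw [hab]; simp [hw]
      obtain ⟨hw0, hw1⟩ := (hmem w).mp hwperm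
      have hedge : (s, w) ∈ edges := ((fra_adj_mem nv edges hE w s hw0 hw1).2).mp hs
      obtain ⟨⟨hs0, hs1⟩, -⟩ := hE (s, w) hedge
      have hsperm : s ∈ perm := (hmem s).mpr ⟨hs0, hs1⟩
      have hwlt : (a ++ v :: b).idxOf w < a.length :=
        (fra_mem_prefix_iff a b v w hndx (hab ▸ hwperm)).mp hw
      have hltp : perm.idxOf w < perm.idxOf v := by
        rw [hab]
        rw [hidv]
        exact hwlt
      have h2 := (H (s, w) hedge).2 v hv hreg.symm hltp
      by_cases hsv : s = v
      · left; exact hsv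
      · right
        have hne : perm.idxOf s ≠ perm.idxOf v := fun hh => hsv (fra_idx_inj perm hnd s v hsperm hv hh)
        have hslt : perm.idxOf s < perm.idxOf v := lt_of_le_of_ne h2 hne
        rw [hab] at hslt
        rw [hidv] at hslt
        exact (fra_mem_prefix_iff a b v s hndx (hab ▸ hsperm)).mpr hslt
lemma fra_pos_len : ∀ (ps : List (Int × Int)) (arr : List Int),
    (ps.foldl (fun a p => PySem.List.pySetD a p.2 p.1) arr).length = arr.length := by
  intro ps
  induction ps with
  | nil => intro arr; rfl
  | cons p ps ih =>
    intro arr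
    rw [List.foldl_cons, ih, PySem.List.length_pySetD]
lemma fra_pos_fold (nv : Int) : ∀ (l arr : List Int) (s : Int), arr.length = nv.toNat →
    l.Nodup → (∀ x ∈ l, 0 ≤ x ∧ x < nv) → ∀ x : Int, 0 ≤ x → x < nv →
    PySem.List.pyGetD ((PySem.List.enumerate l s).foldl
        (fun a p => PySem.List.pySetD a p.2 p.1) arr) x 0
      = if x ∈ l then s + (l.idxOf x : Int) else PySem.List.pyGetD arr x 0 := by
  intro l
  induction l using List.reverseRecOn with
  | nil => intro arr s hlen hnd hr x hx0 hx1; simp [PySem.List.enumerate]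
  | append_singleton m y ih =>
    intro arr s hlen hnd hr x hx0 hx1
    have hym : y ∉ m := by
      have := List.disjoint_of_nodup_append hnd
      intro hy; exact this hy (List.mem_singleton.mpr rfl)
    have hrm : ∀ z ∈ m, 0 ≤ z ∧ z < nv := fun z hz => hr z (by simp [hz])
    have hry := hr y (by simp)
    have hy : y = ((y.toNat : ℕ) : Int) := (Int.toNat_of_nonneg hry.1).symm
    have hxc : x = ((x.toNat : ℕ) : Int) := (Int.toNat_of_nonneg hx0).symm
    rw [PySem.List.enumerate_append]
    simp only [List.foldl_append, PySem.List.enumerate_cons, PySem.List.enumerate_nil,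
      List.foldl_cons, List.foldl_nil]
    have hflen : ((PySem.List.enumerate m s).foldl
        (fun a p => PySem.List.pySetD a p.2 p.1) arr).length = nv.toNat := by
      rw [fra_pos_len]; exact hlen
    show PySem.List.pyGetD (PySem.List.pySetD _ y _) x 0 = _
    rw [hxc, hy, PySem.List.pyGetD_pySetD_natCast _ _ _ _ _ (by omega)]
    by_cases hxy : x.toNat = y.toNat
    · rw [if_pos hxy]
      have hxey : x = y := by omega
      subst hxey
      rw [if_pos (by simp)]
      simp only [← hxc]
      rw [List.idxOf_append, if_neg hym, List.idxOf_cons_self]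
      push_cast
      omega
    · rw [if_neg hxy, ← hxc, ih arr s hlen hnd.of_append_left hrm x hx0 hx1]
      have hxney : x ≠ y := fun h => hxy (by rw [h])
      by_cases hxm : x ∈ m
      · rw [if_pos hxm, if_pos (by simp [hxm]), List.idxOf_append_of_mem hxm]
      · rw [if_neg hxm, if_neg (by simp [hxm]; omega)]
lemma fra_nxt_len (regs pos : List Int) : ∀ (l : List Int) (arr : List Int)
    (d : PySem.Dict Int Int),
    (l.foldl (fraNxtStep regs pos) (arr, d)).1.length = arr.length := by
  intro l
  induction l with
  | nil => intro arr d; rfl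
  | cons v l ih =>
    intro arr d
    rw [List.foldl_cons]
    show (l.foldl (fraNxtStep regs pos) (fraNxtStep regs pos (arr, d) v)).1.length = _
    have : (fraNxtStep regs pos (arr, d) v).1.length = arr.length := by
      unfold fraNxtStep
      cases h : PySem.Dict.get? d (PySem.List.pyGetD regs v 0) with
      | none => simp [h]
      | some p => simp [h, PySem.List.length_pySetD]
    calc (l.foldl (fraNxtStep regs pos) (fraNxtStep regs pos (arr, d) v)).1.length
        = (fraNxtStep regs pos (arr, d) v).1.length := by
          rcases fraNxtStep regs pos (arr, d) v with ⟨a, dd⟩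
          exact ih a dd
      _ = arr.length := this
lemma fra_nxt_last (regs pos : List Int) : ∀ (l : List Int) (arr : List Int)
    (d : PySem.Dict Int Int) (r : Int),
    (l.foldl (fraNxtStep regs pos) (arr, d)).2.get? r =
      (match l.reverse.find? (fun x => PySem.List.pyGetD regs x 0 == r) with
        | some x => some (PySem.List.pyGetD pos x 0)
        | none => d.get? r) := by
  intro l
  induction l using List.reverseRecOn with
  | nil => intro arr d r; rfl
  | append_singleton m w ih =>
    intro arr d r
    rw [List.foldl_append, List.foldl_cons, List.foldl_nil, List.reverse_append]
    simp only [List.reverse_cons, List.reverse_nil, List.nil_append, List.cons_append,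
      List.find?_cons]
    rcases hm : m.foldl (fraNxtStep regs pos) (arr, d) with ⟨a2, d2⟩
    show (fraNxtStep regs pos (a2, d2) w).2.get? r = _
    unfold fraNxtStep
    by_cases hw : PySem.List.pyGetD regs w 0 = r
    · simp only [hw]
      rw [PySem.Dict.get?_insert_self]
      simp [hw]
    · have : (PySem.List.pyGetD regs w 0 == r) = false := by simp [hw]
      simp only [this]
      show (d2.insert (PySem.List.pyGetD regs w 0) _).get? r = _
      rw [PySem.Dict.get?_insert_of_ne _ _ (Ne.symm hw)]
      have := ih arr d r
      rw [hm] at this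
      exact this
lemma fra_nxt_unset (nv : Int) (regs pos : List Int) : ∀ (l : List Int) (arr : List Int)
    (d : PySem.Dict Int Int) (v : Int), (∀ x ∈ l, 0 ≤ x ∧ x < nv) → v ∉ l → 0 ≤ v → v < nv →
    arr.length = nv.toNat →
    PySem.List.pyGetD (l.foldl (fraNxtStep regs pos) (arr, d)).1 v 0 =
      PySem.List.pyGetD arr v 0 := by
  intro l
  induction l using List.reverseRecOn with
  | nil => intro arr d v _ _ _ _ _; rfl
  | append_singleton m w ih =>
    intro arr d v hrl hv hv0 hv1 hlen
    have hrm : ∀ x ∈ m, 0 ≤ x ∧ x < nv := fun x hx => hrl x (by simp [hx])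
    have hrw := hrl w (by simp)
    have hvm : v ∉ m := fun h => hv (by simp [h])
    have hvw : v ≠ w := fun h => hv (by simp [h])
    rw [List.foldl_append, List.foldl_cons, List.foldl_nil]
    rcases hm : m.foldl (fraNxtStep regs pos) (arr, d) with ⟨a2, d2⟩
    have ha2len : a2.length = nv.toNat := by
      have := fra_nxt_len regs pos m arr d
      rw [hm] at this
      simpa [hlen] using this
    have hbase : PySem.List.pyGetD a2 v 0 = PySem.List.pyGetD arr v 0 := by
      have := ih arr d v hrm hvm hv0 hv1 hlen
      rw [hm] at this
      exact this
    show PySem.List.pyGetD (fraNxtStep regs pos (a2, d2) w).1 v 0 = _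
    unfold fraNxtStep
    cases hg : d2.get? (PySem.List.pyGetD regs w 0) with
    | none => simpa [hg] using hbase
    | some p =>
      simp only [hg]
      show PySem.List.pyGetD (PySem.List.pySetD a2 w p) v 0 = _
      have hcw : w = ((w.toNat : ℕ) : Int) := (Int.toNat_of_nonneg hrw.1).symm
      have hcv : v = ((v.toNat : ℕ) : Int) := (Int.toNat_of_nonneg hv0).symm
      rw [hcw, hcv, PySem.List.pyGetD_pySetD_natCast _ _ _ _ _ (by omega),
        if_neg (by omega), ← hcv]
      exact hbase
lemma fra_nxt_getD (nv : Int) (regs pos : List Int) : ∀ (l : List Int) (arr : List Int),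
    l.Nodup → (∀ x ∈ l, 0 ≤ x ∧ x < nv) → arr.length = nv.toNat → ∀ v ∈ l,
    PySem.List.pyGetD (l.foldl (fraNxtStep regs pos) (arr, PySem.Dict.empty)).1 v 0 =
      (match (l.take (l.idxOf v)).reverse.find?
          (fun x => PySem.List.pyGetD regs x 0 == PySem.List.pyGetD regs v 0) with
        | some x => PySem.List.pyGetD pos x 0
        | none => PySem.List.pyGetD arr v 0) := by
  intro l
  induction l using List.reverseRecOn with
  | nil => intro arr _ _ _ v hv; simp at hv
  | append_singleton m w ih =>
    intro arr hnd hrl hlen v hv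
    have hrm : ∀ x ∈ m, 0 ≤ x ∧ x < nv := fun x hx => hrl x (by simp [hx])
    have hrw := hrl w (by simp)
    have hwm : w ∉ m := fun h => (List.disjoint_of_nodup_append hnd) h (List.mem_singleton.mpr rfl)
    rw [List.foldl_append, List.foldl_cons, List.foldl_nil]
    rcases hm : m.foldl (fraNxtStep regs pos) (arr, PySem.Dict.empty) with ⟨a2, d2⟩
    have ha2len : a2.length = nv.toNat := by
      have := fra_nxt_len regs pos m arr PySem.Dict.empty
      rw [hm] at this; simpa [hlen] using this
    show PySem.List.pyGetD (fraNxtStep regs pos (a2, d2) w).1 v 0 = _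
    rcases List.mem_append.mp hv with hvm | hvw
    · -- v ∈ m : the step at w does not touch v
      have hvw : v ≠ w := fun h => hwm (h ▸ hvm)
      have hrv := hrm v hvm
      have hstep : PySem.List.pyGetD (fraNxtStep regs pos (a2, d2) w).1 v 0 =
          PySem.List.pyGetD a2 v 0 := by
        unfold fraNxtStep
        cases hg : d2.get? (PySem.List.pyGetD regs w 0) with
        | none => simp [hg]
        | some p =>
          simp only [hg]
          show PySem.List.pyGetD (PySem.List.pySetD a2 w p) v 0 = _
          have hcw : w = ((w.toNat : ℕ) : Int) := (Int.toNat_of_nonneg hrw.1).symm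
          have hcv : v = ((v.toNat : ℕ) : Int) := (Int.toNat_of_nonneg hrv.1).symm
          rw [hcw, hcv, PySem.List.pyGetD_pySetD_natCast _ _ _ _ _ (by omega),
            if_neg (by omega), ← hcv]
      rw [hstep]
      have hidx : List.idxOf v (m ++ [w]) = List.idxOf v m := List.idxOf_append_of_mem hvm
      have htake : (m ++ [w]).take (List.idxOf v m) = m.take (List.idxOf v m) :=
        List.take_append_of_le_length (le_of_lt (List.idxOf_lt_length_iff.mpr hvm))
      rw [hidx, htake]
      have := ih arr hnd.of_append_left hrm hlen v hvm
      rw [hm] at this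
      exact this
    · -- v = w : this is the step that writes nxt[v]
      have hvw : v = w := List.mem_singleton.mp hvw
      subst hvw
      have hidx : List.idxOf v (m ++ [v]) = m.length := by
        rw [List.idxOf_append, if_neg hwm, List.idxOf_cons_self]
        omega
      have htake : (m ++ [v]).take m.length = m := by
        rw [List.take_append_of_le_length (le_refl _), List.take_length]
      rw [hidx, htake]
      have hlast := fra_nxt_last regs pos m arr PySem.Dict.empty (PySem.List.pyGetD regs v 0)
      rw [hm] at hlast
      show PySem.List.pyGetD (match d2.get? (PySem.List.pyGetD regs v 0) with
        | some p => PySem.List.pySetD a2 v p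
        | none => a2) v 0 = _
      cases hf : m.reverse.find? (fun x => PySem.List.pyGetD regs x 0 == PySem.List.pyGetD regs v 0) with
      | none =>
        have hg : d2.get? (PySem.List.pyGetD regs v 0) = none := by
          rw [hlast, hf, PySem.Dict.get?_empty]
        rw [hg]
        have := fra_nxt_unset nv regs pos m arr PySem.Dict.empty v hrm hwm hrw.1 hrw.2 hlen
        rw [hm] at this
        simpa using this
      | some x =>
        have hg : d2.get? (PySem.List.pyGetD regs v 0) = some (PySem.List.pyGetD pos x 0) := by
          rw [hlast, hf]
        rw [hg]
        show PySem.List.pyGetD (PySem.List.pySetD a2 v (PySem.List.pyGetD pos x 0)) v 0 = _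
        have hcv : v = ((v.toNat : ℕ) : Int) := (Int.toNat_of_nonneg hrw.1).symm
        rw [hcv, PySem.List.pyGetD_pySetD_natCast _ _ _ _ _ (by omega), if_pos rfl]
lemma fra_B_eq (nv : Int) (edges : List (Int × Int)) (regs perm : List Int)
    (hg : fraGuard nv perm = true)
    (hE : ∀ e ∈ edges, (0 ≤ e.1 ∧ e.1 < nv) ∧ (0 ≤ e.2 ∧ e.2 < nv)) :
    (check_fra_alt nv edges regs perm = true ↔ fraOk edges regs perm) := by
  obtain ⟨hlen, hnd, hmem⟩ := fra_guard_facts nv perm hg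
  unfold check_fra_alt
  rw [hg]
  rw [if_neg (by simp)]
  rw [List.all_eq_true]
  have hrep : ∀ (z c : Int), 0 ≤ z → z < nv →
      PySem.List.pyGetD (List.replicate nv.toNat c) z 0 = c := by
    intro z c hz0 hz1
    have hz : z = ((z.toNat : ℕ) : Int) := (Int.toNat_of_nonneg hz0).symm
    rw [hz, PySem.List.pyGetD_natCast]
    simp only [List.getD, List.getElem?_replicate]
    rw [if_pos (by omega)]
    rfl
  have hpos : ∀ x ∈ perm, PySem.List.pyGetD (fraPos nv perm) x 0 = (perm.idxOf x : Int) := by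
    intro x hx
    obtain ⟨hx0, hx1⟩ := (hmem x).mp hx
    unfold fraPos
    rw [fra_pos_fold nv perm (List.replicate nv.toNat 0) 0 (by simp) hnd
      (fun z hz => (hmem z).mp hz) x hx0 hx1, if_pos hx]
    omega
  refine forall₂_congr ?_
  intro e he
  obtain ⟨⟨he10, he11⟩, he20, he21⟩ := hE e he
  have hv : e.1 ∈ perm := (hmem e.1).mpr ⟨he10, he11⟩
  have hu : e.2 ∈ perm := (hmem e.2).mpr ⟨he20, he21⟩
  have hiv : perm.idxOf e.1 < perm.length := List.idxOf_lt_length_iff.mpr hv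
  have hiu : perm.idxOf e.2 < perm.length := List.idxOf_lt_length_iff.mpr hu
  simp only [Bool.and_eq_true, Bool.not_eq_eq_eq_not, Bool.not_true, decide_eq_false_iff_not,
    hpos e.1 hv, hpos e.2 hu, not_le, not_lt]
  have hndr : perm.reverse.Nodup := List.nodup_reverse.mpr hnd
  have hur : e.2 ∈ perm.reverse := List.mem_reverse.mpr hu
  have hnxt := fra_nxt_getD nv regs (fraPos nv perm) perm.reverse
    (List.replicate nv.toNat (nv + 1)) hndr
    (fun z hz => (hmem z).mp (List.mem_reverse.mp hz)) (by simp) e.2 hur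
  have hrevidx : perm.reverse.idxOf e.2 = perm.length - 1 - perm.idxOf e.2 := by
    have h1 : perm.reverse[perm.length - 1 - perm.idxOf e.2]'(by simp; omega) =
        perm[perm.idxOf e.2]'hiu := by
      rw [List.getElem_reverse]
      congr 1
      omega
    have h2 := hndr.idxOf_getElem (perm.length - 1 - perm.idxOf e.2) (by simp; omega)
    rw [h1, List.getElem_idxOf hiu] at h2
    exact h2
  have htake : (perm.reverse.take (perm.reverse.idxOf e.2)).reverse =
      perm.drop (perm.idxOf e.2 + 1) := by
    rw [hrevidx, List.take_reverse, List.reverse_reverse]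
    congr 1
    omega
  rw [htake] at hnxt
  cases hf : (perm.drop (perm.idxOf e.2 + 1)).find?
      (fun x => PySem.List.pyGetD regs x 0 == PySem.List.pyGetD regs e.2 0) with
  | none =>
    simp only [hf] at hnxt
    rw [hrep e.2 (nv + 1) he20 he21] at hnxt
    rw [hnxt]
    have hall := List.find?_eq_none.mp hf
    constructor
    · rintro ⟨hlt, -⟩
      refine ⟨by exact_mod_cast hlt, ?_⟩
      intro x hx hreg hlt2
      exfalso
      have hxd : x ∈ perm.drop (perm.idxOf e.2 + 1) :=
        (fra_mem_drop_iff perm hnd _ x).mpr ⟨hx, by omega⟩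
      exact absurd (by simp [hreg] : (PySem.List.pyGetD regs x 0 == PySem.List.pyGetD regs e.2 0) = true)
        (by simpa using hall x hxd)
    · rintro ⟨hlt, -⟩
      refine ⟨by exact_mod_cast hlt, ?_⟩
      have : (perm.idxOf e.1 : Int) < nv := by
        rw [← hlen]
        exact_mod_cast hiv
      omega
  | some x =>
    have hfs := List.find?_eq_some_iff_getElem.mp hf
    obtain ⟨hpx, i, hi, hxi, hmin⟩ := hfs
    have hxd : x ∈ perm.drop (perm.idxOf e.2 + 1) := by
      rw [← hxi]
      exact List.getElem_mem _
    obtain ⟨hxp, hxge⟩ := (fra_mem_drop_iff perm hnd _ x).mp hxd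
    have hregx : PySem.List.pyGetD regs x 0 = PySem.List.pyGetD regs e.2 0 := by
      simpa using hpx
    have hidxx : perm.idxOf x = perm.idxOf e.2 + 1 + i := by
      have hh := hnd.idxOf_getElem (perm.idxOf e.2 + 1 + i) (by
        have h5 := hi
        simp at h5
        omega)
      rw [← List.getElem_drop (i := perm.idxOf e.2 + 1) (j := i), hxi] at hh
      exact hh
      exact hi
    simp only [hf] at hnxt
    rw [hpos x hxp] at hnxt
    rw [hnxt]
    constructor
    · rintro ⟨hlt, hge⟩
      refine ⟨by exact_mod_cast hlt, ?_⟩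
      intro y hy hregy hlty
      have hyd : y ∈ perm.drop (perm.idxOf e.2 + 1) :=
        (fra_mem_drop_iff perm hnd _ y).mpr ⟨hy, by omega⟩
      obtain ⟨j, hj, hyj⟩ := List.getElem_of_mem hyd
      have hpy : (PySem.List.pyGetD regs ((perm.drop (perm.idxOf e.2 + 1))[j]) 0 ==
          PySem.List.pyGetD regs e.2 0) = true := by
        rw [hyj]
        simp [hregy]
      have hji : i ≤ j := by
        by_contra hji
        push_neg at hji
        have hcontra := hmin j hji
        rw [hpy] at hcontra
        simp at hcontra
      have hidxy : perm.idxOf y = perm.idxOf e.2 + 1 + j := by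
        have hh := hnd.idxOf_getElem (perm.idxOf e.2 + 1 + j) (by
          have h5 := hj
          simp at h5
          omega)
        rw [← List.getElem_drop (i := perm.idxOf e.2 + 1) (j := j), hyj] at hh
        exact hh
        exact hj
      have hge2 : (perm.idxOf e.1 : Int) ≤ (perm.idxOf x : Int) := hge
      omega
    · rintro ⟨hlt, hforall⟩
      refine ⟨by exact_mod_cast hlt, ?_⟩
      have hres := hforall x hxp hregx (by omega)
      exact_mod_cast hres
-- ===== VERDICT (by name: the statement is the Claim_ definition above) =====
theorem check_fra_spec : Claim_equal_check_fra := by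
  unfold Claim_equal_check_fra
  intro nv edges regs perm _hdom hpre
  unfold Spec_check_fra
  by_cases hg : fraGuard nv perm = true
  · have hfacts := fra_guard_facts nv perm hg
    have hant : (perm.length : Int) = nv ∧ ∀ i ∈ PySem.List.pyRange 0 nv 1, i ∈ perm := by
      refine ⟨hfacts.1, fun i hi => ?_⟩
      rw [hfacts.2.2]
      exact PySem.List.mem_pyRange_one.mp hi
    have hE := (hpre hant).1
    rw [Bool.eq_iff_iff, fra_A_eq nv edges regs perm hg hE, fra_B_eq nv edges regs perm hg hE]
  · rw [Bool.not_eq_true] at hg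
    simp only [check_fra, check_fra_alt, hg]
    simp
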